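-- pv_equiv track=rewrite | github.com/zhr1996/Algorithm-Study-Group | Dynamic Programming/maximum_score_from_performing_multiplication_opeartion.py | maximumScore
-- ===== SOURCE A (Python) =====
-- from typing import List
--
-- def maximumScore(nums: List[int], multipliers: List[int]) -> int:
--     n = len(nums)
--     m = len(multipliers)
--
--     dp = [[0 for _ in range(m + 1)] for _ in range(m + 1)]
--
--     # initialize boundary
--     # for j in range(m + 1):
--     #     dp[m][j] = 0
--
--     for i in range(m - 1, -1, -1):
--         for left in range(i, -1, -1):
--             right = n - 1 - (i - left)
--             dp[i][left] = max(dp[i+1][left+1] + nums[left] *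
--                               multipliers[i], dp[i+1][left] + nums[right] * multipliers[i])
--     return dp[0][0]
-- ===== SOURCE B (Python) =====
-- from typing import List
--
-- def maximumScore(nums: List[int], multipliers: List[int]) -> int:
--     # Top-down memoized evaluation of the same recurrence, driven by an
--     # explicit stack (no recursion limit): state (i, left), right = n-1-(i-left).
--     n, m = len(nums), len(multipliers)
--     memo = {}
--     stack = [(0, 0)]
--     while stack:
--         i, left = stack[-1]
--         if (i, left) in memo:
--             stack.pop()
--             continue
--         if i == m:
--             memo[(i, left)] = 0
--             stack.pop()
--             continue
--         a, b = (i + 1, left + 1), (i + 1, left)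
--         if a not in memo:
--             stack.append(a)
--         elif b not in memo:
--             stack.append(b)
--         else:
--             right = n - 1 - (i - left)
--             memo[(i, left)] = max(multipliers[i] * nums[left] + memo[a],
--                                   multipliers[i] * nums[right] + memo[b])
--             stack.pop()
--     return memo[(0, 0)]
-- ===== Notes on version B (the rewrite author's own statement) =====
-- stated objective: alternative
-- what changed: Replaced the bottom-up (m+1)x(m+1) DP table fill with a top-down memoized evaluation of the same recurrence, driven by an explicit stack of (i, left) states and a dict memo, so only reachable states are solved and no 2-D table is allocated.
import Mathlib
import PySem

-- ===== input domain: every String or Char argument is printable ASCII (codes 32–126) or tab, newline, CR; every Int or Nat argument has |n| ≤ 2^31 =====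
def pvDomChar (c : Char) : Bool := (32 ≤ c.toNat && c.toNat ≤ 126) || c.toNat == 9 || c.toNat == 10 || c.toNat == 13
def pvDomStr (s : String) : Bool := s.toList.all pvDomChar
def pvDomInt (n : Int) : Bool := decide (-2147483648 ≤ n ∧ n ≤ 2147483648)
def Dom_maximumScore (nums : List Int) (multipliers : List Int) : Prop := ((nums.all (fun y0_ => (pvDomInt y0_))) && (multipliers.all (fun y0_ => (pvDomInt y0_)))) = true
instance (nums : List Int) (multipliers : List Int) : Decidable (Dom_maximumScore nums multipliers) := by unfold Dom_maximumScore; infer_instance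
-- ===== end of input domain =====

-- B replaces A's bottom-up (m+1)x(m+1) table fill with a top-down memoized evaluation of the
-- same recurrence driven by an explicit stack and a dict memo (objective: alternative).

-- ===== PORT A =====
-- The Python dp table is the zero-initialised (m+1)x(m+1) list-of-lists; dp[i][left] = v is
-- List.set on row i. The loop indices i, left are never negative, so '.toNat' is exact, and
-- they are always < m+1, so the '.getD' defaults are never reached by the loops.
-- nums[left] / nums[right] are PySem.List.pyGet? (none = IndexError); their '.getD 0' is only
-- reached outside Pre_maximumScore (where the Python raises).

-- body of the inner 'for left' loop: dp[i][left] = max(...)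
def AStep (nums : List Int) (multipliers : List Int) (i : Int) (dp : List (List Int)) (left : Int) : List (List Int) :=
  let right := (nums.length : Int) - 1 - (i - left)
  let v := max ((dp.getD (i+1).toNat []).getD (left+1).toNat 0 + (PySem.List.pyGet? nums left).getD 0 * (PySem.List.pyGet? multipliers i).getD 0)
               ((dp.getD (i+1).toNat []).getD left.toNat 0 + (PySem.List.pyGet? nums right).getD 0 * (PySem.List.pyGet? multipliers i).getD 0)
  dp.set i.toNat ((dp.getD i.toNat []).set left.toNat v)

-- the inner 'for left in range(i, -1, -1)' loop
def AInner (nums : List Int) (multipliers : List Int) (i : Int) (dp : List (List Int)) : List (List Int) :=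
  (PySem.List.pyRange i (-1) (-1)).foldl (AStep nums multipliers i) dp

def maximumScore (nums : List Int) (multipliers : List Int) : Int :=
  let m : Int := multipliers.length
  let dp0 : List (List Int) := List.replicate (m.toNat + 1) (List.replicate (m.toNat + 1) 0)
  let dp := (PySem.List.pyRange (m-1) (-1) (-1)).foldl (fun dp i => AInner nums multipliers i dp) dp0
  (dp.getD 0 []).getD 0 0

-- ===== PORT B =====
-- The while-loop of Source B: stack of (i, left) states (head = top), dict memo. The fuel argument
-- only makes the loop total in Lean (it is proved sufficient below); Source B's loop needs none.
def altLoop (nums : List Int) (multipliers : List Int) (n : Int) (m : Int) :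
    Nat → List (Int × Int) → PySem.Dict (Int × Int) Int → PySem.Dict (Int × Int) Int
  | 0, _, memo => memo
  | _+1, [], memo => memo
  | fuel+1, (i, left) :: rest, memo =>
    if (memo.get? (i, left)).isSome then altLoop nums multipliers n m fuel rest memo
    else if i = m then altLoop nums multipliers n m fuel rest (memo.insert (i, left) 0)
    else if (memo.get? (i+1, left+1)).isNone then
      altLoop nums multipliers n m fuel ((i+1, left+1) :: (i, left) :: rest) memo
    else if (memo.get? (i+1, left)).isNone then
      altLoop nums multipliers n m fuel ((i+1, left) :: (i, left) :: rest) memo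
    else
      let right := n - 1 - (i - left)
      let v := max ((PySem.List.pyGet? multipliers i).getD 0 * (PySem.List.pyGet? nums left).getD 0 + memo.getD (i+1, left+1) 0)
                   ((PySem.List.pyGet? multipliers i).getD 0 * (PySem.List.pyGet? nums right).getD 0 + memo.getD (i+1, left) 0)
      altLoop nums multipliers n m fuel rest (memo.insert (i, left) v)

-- fuel that is proved to outlast the loop: ((m+1)^2 + 1) * (m + 3)
def altFuel (m : Int) : Nat := (((m+1)*(m+1)+1)*(m+3)).toNat

-- final 'return memo[(0, 0)]': the key is always present when the loop exits (proved below),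
-- so '.getD 0' never supplies its default on the natural exit.
def maximumScore_alt (nums : List Int) (multipliers : List Int) : Int :=
  let n : Int := nums.length
  let m : Int := multipliers.length
  let memo := altLoop nums multipliers n m (altFuel m) [(0, 0)] PySem.Dict.empty
  ((memo.get? (0, 0)).getD 0)

-- ===== PRECONDITION & SPEC =====
-- Pre_ excludes exactly the inputs where the Python A raises IndexError: when
-- len(multipliers) > len(nums), A's first iteration reads nums[m-1] with m-1 >= len(nums).
def Pre_maximumScore (nums : List Int) (multipliers : List Int) : Prop :=
  multipliers.length ≤ nums.length
instance (nums : List Int) (multipliers : List Int) : Decidable (Pre_maximumScore nums multipliers) := by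
  unfold Pre_maximumScore; infer_instance

def pvWitness_maximumScore : List Int × List Int := ([2, 1, 3], [3, 2])

def Spec_maximumScore (nums : List Int) (multipliers : List Int) (out : Int) : Prop := out = maximumScore_alt nums multipliers
instance (nums : List Int) (multipliers : List Int) (out : Int) : Decidable (Spec_maximumScore nums multipliers out) := by unfold Spec_maximumScore; infer_instance

-- ===== CLAIM (what is proved, stated in full; the proofs are below) =====
def Claim_equal_maximumScore : Prop := ∀ (nums : List Int) (multipliers : List Int), Dom_maximumScore nums multipliers → Pre_maximumScore nums multipliers → Spec_maximumScore nums multipliers (maximumScore nums multipliers)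

-- ===== LEMMAS AND PROOFS =====

-- reference value of state (i, left): the common recurrence both programs compute
def gRef (nums : List Int) (multipliers : List Int) (i left : Int) : Int :=
  if _h : i < (multipliers.length : Int) then
    max ((PySem.List.pyGet? multipliers i).getD 0 * (PySem.List.pyGet? nums left).getD 0 +
          gRef nums multipliers (i+1) (left+1))
        ((PySem.List.pyGet? multipliers i).getD 0 * (PySem.List.pyGet? nums ((nums.length : Int) - 1 - (i - left))).getD 0 +
          gRef nums multipliers (i+1) left)
  else 0
termination_by ((multipliers.length : Int) - i).toNat
decreasing_by all_goals omega


-- reading dp[a][b] from the table (0 when out of range; the proofs only use in-range reads)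
def tread (dp : List (List Int)) (a b : Int) : Int := (dp.getD a.toNat []).getD b.toNat 0

-- the table stays a (m+1)x(m+1) rectangle
def TShape (m : Nat) (dp : List (List Int)) : Prop :=
  dp.length = m + 1 ∧ ∀ r ∈ dp, r.length = m + 1

-- the value the inner loop writes into dp[i][b], as a function of the table it reads (row i+1)
def Aval (nums : List Int) (multipliers : List Int) (i b : Int) (dp : List (List Int)) : Int :=
  max (tread dp (i+1) (b+1) + (PySem.List.pyGet? nums b).getD 0 * (PySem.List.pyGet? multipliers i).getD 0)
      (tread dp (i+1) b + (PySem.List.pyGet? nums ((nums.length : Int) - 1 - (i - b))).getD 0 * (PySem.List.pyGet? multipliers i).getD 0)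

theorem row_len (m : Nat) (dp : List (List Int)) (h : TShape m dp) (j : Nat) (hj : j < dp.length) :
    (dp.getD j []).length = m + 1 := by
  rw [List.getD_eq_getElem?_getD, List.getElem?_eq_getElem hj]
  exact h.2 _ (List.getElem_mem hj)

theorem getD_set_self_int {α : Type} (l : List α) (n : Nat) (x d : α) (h : n < l.length) :
    (l.set n x).getD n d = x := by
  rw [List.getD_eq_getElem?_getD, List.getElem?_set_self h, Option.getD_some]

theorem getD_set_ne_int {α : Type} (l : List α) (n m : Nat) (x d : α) (h : n ≠ m) :
    (l.set n x).getD m d = l.getD m d := by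
  rw [List.getD_eq_getElem?_getD, List.getElem?_set_ne h, List.getD_eq_getElem?_getD]

theorem TShape_set (m : Nat) (dp : List (List Int)) (j k : Nat) (v : Int) (h : TShape m dp) :
    TShape m (dp.set j ((dp.getD j []).set k v)) := by
  by_cases hj : j < dp.length
  · refine ⟨by rw [List.length_set]; exact h.1, ?_⟩
    intro r hr
    rcases List.mem_or_eq_of_mem_set hr with hr' | rfl
    · exact h.2 r hr'
    · rw [List.length_set]; exact row_len m dp h j hj
  · rw [List.set_eq_of_length_le (by omega)]; exact h

theorem tread_AStep (nums multipliers : List Int) (i left : Int) (dp : List (List Int))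
    (h : TShape multipliers.length dp)
    (hi0 : 0 ≤ i) (him : i ≤ (multipliers.length : Int)) (hl0 : 0 ≤ left) (hli : left ≤ i)
    (a b : Int) (ha : 0 ≤ a) (hb : 0 ≤ b) :
    tread (AStep nums multipliers i dp left) a b
      = if a = i ∧ b = left then Aval nums multipliers i left dp else tread dp a b := by
  have hdl : dp.length = multipliers.length + 1 := h.1
  have hidp : i.toNat < dp.length := by omega
  have hrow : (dp.getD i.toNat []).length = multipliers.length + 1 := row_len _ _ h _ hidp
  have hlrow : left.toNat < (dp.getD i.toNat []).length := by omega
  by_cases hai : a = i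
  · have hnat : a.toNat = i.toNat := by omega
    by_cases hbl : b = left
    · have hbn : b.toNat = left.toNat := by omega
      rw [if_pos ⟨hai, hbl⟩]
      simp only [AStep, tread, hnat, hbn]
      rw [getD_set_self_int _ _ _ _ hidp, getD_set_self_int _ _ _ _ hlrow]
      rfl
    · have hbn : left.toNat ≠ b.toNat := by omega
      rw [if_neg (by rintro ⟨-, hh⟩; exact hbl hh)]
      simp only [AStep, tread, hnat]
      rw [getD_set_self_int _ _ _ _ hidp, getD_set_ne_int _ _ _ _ _ hbn]
  · have hnat : i.toNat ≠ a.toNat := by omega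
    rw [if_neg (by rintro ⟨hh, -⟩; exact hai hh)]
    simp only [AStep, tread]
    rw [getD_set_ne_int _ _ _ _ _ hnat]

theorem A_inner_fold (nums multipliers : List Int) (i : Int) (dp : List (List Int)) (c : Nat)
    (h : TShape multipliers.length dp)
    (hi0 : 0 ≤ i) (him : i ≤ (multipliers.length : Int)) (hc : (c : Int) ≤ i + 1) :
    TShape multipliers.length (((List.range c).map (fun k : Nat => i - (k : Int))).foldl (AStep nums multipliers i) dp) ∧
    ∀ a b : Int, 0 ≤ a → 0 ≤ b →
      tread (((List.range c).map (fun k : Nat => i - (k : Int))).foldl (AStep nums multipliers i) dp) a b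
        = if a = i ∧ i - (c : Int) < b ∧ b ≤ i then Aval nums multipliers i b dp else tread dp a b := by
  induction c with
  | zero =>
    simp only [List.range_zero, List.map_nil, List.foldl_nil]
    refine ⟨h, ?_⟩
    intro a b ha hb
    rw [if_neg]; rintro ⟨rfl, h1, h2⟩; omega
  | succ c ih =>
    have hc' : (c : Int) ≤ i + 1 := by omega
    obtain ⟨ihs, ihr⟩ := ih hc'
    rw [List.range_succ, List.map_append, List.foldl_append]
    simp only [List.map_cons, List.map_nil, List.foldl_cons, List.foldl_nil]
    have hl0 : (0:Int) ≤ i - (c : Int) := by omega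
    have hli : i - (c : Int) ≤ i := by omega
    have hstep := tread_AStep nums multipliers i (i - (c : Int)) _ ihs hi0 him hl0 hli
    refine ⟨TShape_set _ _ _ _ _ ihs, ?_⟩
    intro a b ha hb
    have hrd : ∀ x : Int, 0 ≤ x →
        tread (((List.range c).map (fun k : Nat => i - (k : Int))).foldl (AStep nums multipliers i) dp) (i+1) x
          = tread dp (i+1) x := by
      intro x hx
      rw [ihr (i+1) x (by omega) hx, if_neg]
      rintro ⟨h1, -⟩; omega
    have hAval : Aval nums multipliers i (i - (c : Int))
        (((List.range c).map (fun k : Nat => i - (k : Int))).foldl (AStep nums multipliers i) dp)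
          = Aval nums multipliers i (i - (c : Int)) dp := by
      rw [Aval, Aval, hrd (i - (c:Int) + 1) (by omega), hrd (i - (c:Int)) (by omega)]
    by_cases hai : a = i
    · by_cases hbl : b = i - (c : Int)
      · rw [hstep a b ha hb, if_pos ⟨hai, hbl⟩, hAval,
            if_pos ⟨hai, by push_cast; omega, by omega⟩, hbl]
      · rw [hstep a b ha hb, if_neg (by rintro ⟨-, hh⟩; exact hbl hh), ihr a b ha hb]
        by_cases hcnd : i - ((c : Int) + 1) < b ∧ b ≤ i
        · rw [if_pos ⟨hai, by omega⟩, if_pos ⟨hai, by push_cast; omega⟩]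
        · rw [if_neg (by rintro ⟨-, h1, h2⟩; exact hcnd ⟨by omega, h2⟩),
              if_neg (by rintro ⟨-, h1, h2⟩; push_cast at h1; exact hcnd ⟨by omega, h2⟩)]
    · rw [hstep a b ha hb, if_neg (by rintro ⟨hh, -⟩; exact hai hh), ihr a b ha hb,
          if_neg (by rintro ⟨hh, -⟩; exact hai hh), if_neg (by rintro ⟨hh, -⟩; exact hai hh)]

theorem AInner_eq (nums multipliers : List Int) (i : Int) (dp : List (List Int))
    (h : TShape multipliers.length dp) (hi0 : 0 ≤ i) (him : i ≤ (multipliers.length : Int)) :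
    TShape multipliers.length (AInner nums multipliers i dp) ∧
    ∀ a b : Int, 0 ≤ a → 0 ≤ b →
      tread (AInner nums multipliers i dp) a b
        = if a = i ∧ 0 ≤ b ∧ b ≤ i then Aval nums multipliers i b dp else tread dp a b := by
  have hr : PySem.List.pyRange i (-1) (-1) = (List.range (i + 1).toNat).map (fun k : Nat => i - (k : Int)) := by
    rw [PySem.List.pyRange_neg_one]; norm_num
  obtain ⟨hs, hread⟩ := A_inner_fold nums multipliers i dp (i + 1).toNat h hi0 him (by omega)
  rw [AInner, hr]
  refine ⟨hs, ?_⟩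
  intro a b ha hb
  rw [hread a b ha hb]
  have hcast : i - ((((i + 1).toNat) : Nat) : Int) = -1 := by omega
  rw [hcast]
  by_cases hcnd : a = i ∧ 0 ≤ b ∧ b ≤ i
  · rw [if_pos ⟨hcnd.1, by omega, hcnd.2.2⟩, if_pos hcnd]
  · rw [if_neg (fun hh => hcnd ⟨hh.1, by omega, hh.2.2⟩), if_neg hcnd]

theorem getD_replicate_int {α : Type} (n i : Nat) (a d : α) :
    (List.replicate n a).getD i d = if i < n then a else d := by
  rw [List.getD_eq_getElem?_getD, List.getElem?_replicate]
  by_cases h : i < n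
  · rw [if_pos h, if_pos h, Option.getD_some]
  · rw [if_neg h, if_neg h, Option.getD_none]

theorem tread_zero_table (m : Nat) (a b : Int) :
    tread (List.replicate (m + 1) (List.replicate (m + 1) (0:Int))) a b = 0 := by
  rw [tread, getD_replicate_int]
  by_cases h : a.toNat < m + 1
  · rw [if_pos h, getD_replicate_int]
    by_cases h2 : b.toNat < m + 1
    · rw [if_pos h2]
    · rw [if_neg h2]
  · rw [if_neg h]
    simp

theorem A_outer_fold (nums multipliers : List Int) (c : Nat) (hc : c ≤ multipliers.length) :
    TShape multipliers.length
      (((List.range c).map (fun k : Nat => (multipliers.length : Int) - 1 - (k : Int))).foldl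
        (fun dp i => AInner nums multipliers i dp)
        (List.replicate (multipliers.length + 1) (List.replicate (multipliers.length + 1) 0))) ∧
    ∀ a b : Int, 0 ≤ a → 0 ≤ b →
      tread (((List.range c).map (fun k : Nat => (multipliers.length : Int) - 1 - (k : Int))).foldl
          (fun dp i => AInner nums multipliers i dp)
          (List.replicate (multipliers.length + 1) (List.replicate (multipliers.length + 1) 0))) a b
        = if (multipliers.length : Int) - (c : Int) ≤ a ∧ a ≤ (multipliers.length : Int) - 1 ∧ 0 ≤ b ∧ b ≤ a
          then gRef nums multipliers a b else 0 := by
  induction c with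
  | zero =>
    simp only [List.range_zero, List.map_nil, List.foldl_nil]
    refine ⟨⟨List.length_replicate, fun r hr => by rw [(List.eq_of_mem_replicate hr)]; exact List.length_replicate⟩, ?_⟩
    intro a b ha hb
    rw [tread_zero_table, if_neg]
    rintro ⟨h1, h2, -⟩; omega
  | succ c ih =>
    have hc' : c ≤ multipliers.length := Nat.le_of_succ_le hc
    obtain ⟨ihs, ihr⟩ := ih hc'
    rw [List.range_succ, List.map_append, List.foldl_append]
    simp only [List.map_cons, List.map_nil, List.foldl_cons, List.foldl_nil]
    have hi0 : (0:Int) ≤ (multipliers.length : Int) - 1 - (c : Int) := by omega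
    have him : (multipliers.length : Int) - 1 - (c : Int) ≤ (multipliers.length : Int) := by omega
    obtain ⟨hs2, hread⟩ := AInner_eq nums multipliers ((multipliers.length : Int) - 1 - (c : Int)) _ ihs hi0 him
    refine ⟨hs2, ?_⟩
    intro a b ha hb
    rw [hread a b ha hb]
    have hrow : ∀ x : Int, 0 ≤ x → x ≤ ((multipliers.length : Int) - 1 - (c : Int)) + 1 →
        tread (((List.range c).map (fun k : Nat => (multipliers.length : Int) - 1 - (k : Int))).foldl
            (fun dp i => AInner nums multipliers i dp)
            (List.replicate (multipliers.length + 1) (List.replicate (multipliers.length + 1) 0))) ((multipliers.length : Int) - 1 - (c : Int) + 1) x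
          = gRef nums multipliers ((multipliers.length : Int) - 1 - (c : Int) + 1) x := by
      intro x hx0 hx1
      rw [ihr _ x (by omega) hx0]
      by_cases hcz : c = 0
      · rw [if_neg (by rintro ⟨-, h2, -⟩; omega)]
        rw [gRef, dif_neg (by omega)]
      · rw [if_pos ⟨by omega, by omega, hx0, hx1⟩]
    by_cases hai : a = (multipliers.length : Int) - 1 - (c : Int)
    · rw [hai]
      by_cases hb2 : 0 ≤ b ∧ b ≤ (multipliers.length : Int) - 1 - (c : Int)
      · rw [if_pos ⟨rfl, hb2⟩, if_pos ⟨by push_cast; omega, by omega, by omega, by omega⟩]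
        have hlt : (multipliers.length : Int) - 1 - (c : Int) < (multipliers.length : Int) := by omega
        rw [Aval, hrow (b+1) (by omega) (by omega), hrow b (by omega) (by omega)]
        conv_rhs => rw [gRef]
        rw [dif_pos hlt]
        congr 1 <;> ring
      · rw [if_neg (by rintro ⟨-, hh⟩; exact hb2 hh), if_neg (by rintro ⟨-, -, hh⟩; exact hb2 hh),
            ihr _ b (by omega) hb, if_neg (by rintro ⟨h1, -⟩; omega)]
    · rw [if_neg (by rintro ⟨hh, -⟩; exact hai hh), ihr a b ha hb]
      by_cases hcnd : (multipliers.length : Int) - ((c:Int)+1) ≤ a ∧ a ≤ (multipliers.length : Int) - 1 ∧ 0 ≤ b ∧ b ≤ a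
      · rw [if_pos ⟨by omega, hcnd.2⟩, if_pos (by push_cast; exact hcnd)]
      · rw [if_neg (by rintro ⟨h1, h2⟩; exact hcnd ⟨by omega, h2⟩),
            if_neg (by rintro ⟨h1, h2⟩; push_cast at h1; exact hcnd ⟨h1, h2⟩)]

theorem A_eq_gRef (nums multipliers : List Int) :
    maximumScore nums multipliers = gRef nums multipliers 0 0 := by
  have hr : PySem.List.pyRange ((multipliers.length : Int) - 1) (-1) (-1)
      = (List.range multipliers.length).map (fun k : Nat => (multipliers.length : Int) - 1 - (k : Int)) := by
    rw [PySem.List.pyRange_neg_one]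
    norm_num
  have htn : ((multipliers.length : Int)).toNat = multipliers.length := by omega
  show ((((PySem.List.pyRange ((multipliers.length : Int) - 1) (-1) (-1))).foldl
      (fun dp i => AInner nums multipliers i dp)
      (List.replicate (((multipliers.length : Int)).toNat + 1) (List.replicate (((multipliers.length : Int)).toNat + 1) 0))).getD 0 []).getD 0 0 = _
  rw [hr, htn]
  obtain ⟨-, hread⟩ := A_outer_fold nums multipliers multipliers.length le_rfl
  have h00 := hread 0 0 le_rfl le_rfl
  rw [show tread (((List.range multipliers.length).map (fun k : Nat => (multipliers.length : Int) - 1 - (k : Int))).foldl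
      (fun dp i => AInner nums multipliers i dp)
      (List.replicate (multipliers.length + 1) (List.replicate (multipliers.length + 1) 0))) 0 0
    = (((((List.range multipliers.length).map (fun k : Nat => (multipliers.length : Int) - 1 - (k : Int))).foldl
      (fun dp i => AInner nums multipliers i dp)
      (List.replicate (multipliers.length + 1) (List.replicate (multipliers.length + 1) 0)))).getD 0 []).getD 0 0 from rfl] at h00
  rw [h00]
  by_cases hm : multipliers.length = 0
  · rw [if_neg (by rintro ⟨-, h2, -⟩; omega)]
    rw [gRef, dif_neg (by omega)]
  · rw [if_pos ⟨by omega, by omega, le_rfl, le_rfl⟩]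

-- ===== B-side proof machinery =====

-- relation along the stack: each entry sits strictly above (larger first component than) the one below it
def StkRel (x y : Int × Int) : Prop := y.1 < x.1

def StkOK (m : Int) (stack : List (Int × Int)) : Prop :=
  (∀ s ∈ stack, 0 ≤ s.1 ∧ s.1 ≤ m ∧ 0 ≤ s.2 ∧ s.2 ≤ s.1) ∧ List.IsChain StkRel stack

def MemOK (nums multipliers : List Int) (memo : PySem.Dict (Int × Int) Int) : Prop :=
  memo.keys.Nodup ∧
  (∀ k ∈ memo.keys, 0 ≤ k.1 ∧ k.1 ≤ (multipliers.length : Int) ∧ 0 ≤ k.2 ∧ k.2 ≤ (multipliers.length : Int)) ∧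
  (∀ k v, memo.get? k = some v → v = gRef nums multipliers k.1 k.2)

-- termination potential of the while loop
def phi (m : Int) (stack : List (Int × Int)) (memo : PySem.Dict (Int × Int) Int) : Nat :=
  (((m+1)*(m+1)).toNat - memo.size) * (m.toNat + 3) + (m.toNat + 3 - stack.length)

theorem stk_pairwise (stack : List (Int × Int)) (h : List.IsChain StkRel stack) :
    List.Pairwise StkRel stack := by
  haveI : Trans StkRel StkRel StkRel := ⟨fun h1 h2 => lt_trans h2 h1⟩
  exact List.isChain_iff_pairwise.mp h

theorem stk_len_le (m : Int) (stack : List (Int × Int)) (h : StkOK m stack) :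
    stack.length ≤ m.toNat + 1 := by
  have hpw := stk_pairwise stack h.2
  have hpw' : List.Pairwise (fun x y : Int => y < x) (stack.map Prod.fst) := by
    rw [List.pairwise_map]; exact hpw
  have hnd : (stack.map Prod.fst).Nodup := hpw'.imp (fun hab => ne_of_gt hab)
  have hsub : (stack.map Prod.fst).toFinset ⊆ Finset.Icc (0:Int) m := by
    intro x hx
    obtain ⟨s, hs, rfl⟩ := List.mem_map.mp (List.mem_toFinset.mp hx)
    have hb := h.1 s hs
    rw [Finset.mem_Icc]
    exact ⟨hb.1, hb.2.1⟩
  have h2 := Finset.card_le_card hsub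
  rw [List.toFinset_card_of_nodup hnd, List.length_map, Int.card_Icc] at h2
  omega

theorem memo_size_le (nums multipliers : List Int) (memo : PySem.Dict (Int × Int) Int)
    (h : MemOK nums multipliers memo) : memo.size ≤ ((((multipliers.length : Int))+1)*(((multipliers.length : Int))+1)).toNat := by
  have hsub : memo.keys.toFinset ⊆
      Finset.Icc (0:Int) (multipliers.length : Int) ×ˢ Finset.Icc (0:Int) (multipliers.length : Int) := by
    intro x hx
    have hb := h.2.1 x (List.mem_toFinset.mp hx)
    rw [Finset.mem_product, Finset.mem_Icc, Finset.mem_Icc]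
    exact ⟨⟨hb.1, hb.2.1⟩, ⟨hb.2.2.1, hb.2.2.2⟩⟩
  have h2 := Finset.card_le_card hsub
  rw [List.toFinset_card_of_nodup h.1, Finset.card_product, Int.card_Icc] at h2
  simp only [sub_zero] at h2
  have hlen : memo.keys.length = memo.size := by
    simp [PySem.Dict.keys, PySem.Dict.size]
  rw [Int.toNat_mul (by omega) (by omega)]
  omega


theorem gRef_base (nums multipliers : List Int) (left : Int) :
    gRef nums multipliers (multipliers.length : Int) left = 0 := by
  rw [gRef, dif_neg (by omega)]

theorem phi_push (m : Int) (stack : List (Int × Int)) (memo : PySem.Dict (Int × Int) Int) (a : Int × Int)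
    (hS : (a :: stack).length ≤ m.toNat + 1) :
    phi m (a :: stack) memo < phi m stack memo := by
  unfold phi
  apply Nat.add_lt_add_left
  simp only [List.length_cons] at *
  omega

theorem phi_insert_lt (m : Int) (top : Int × Int) (stack : List (Int × Int))
    (memo : PySem.Dict (Int × Int) Int) (v : Int)
    (hfresh : memo.get? top = none)
    (hsize : memo.size + 1 ≤ ((m+1)*(m+1)).toNat)
    (hS : (top :: stack).length ≤ m.toNat + 1) :
    phi m stack (memo.insert top v) < phi m (top :: stack) memo := by
  unfold phi
  have hc : memo.contains top = false := by
    rw [PySem.Dict.contains_eq_isSome_get?, hfresh]; rfl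
  rw [PySem.Dict.size_insert, hc]
  simp only [Bool.false_eq_true, if_false]
  have he : ((m+1)*(m+1)).toNat - memo.size = (((m+1)*(m+1)).toNat - (memo.size+1)) + 1 := by omega
  rw [he, Nat.succ_mul]
  simp only [List.length_cons] at *
  generalize (((m+1)*(m+1)).toNat - (memo.size+1)) * (m.toNat + 3) = P
  omega

theorem MemOK_insert (nums multipliers : List Int) (memo : PySem.Dict (Int × Int) Int)
    (p : Int × Int) (v : Int)
    (hm : MemOK nums multipliers memo)
    (hb : 0 ≤ p.1 ∧ p.1 ≤ (multipliers.length : Int) ∧ 0 ≤ p.2 ∧ p.2 ≤ (multipliers.length : Int))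
    (hfresh : memo.get? p = none)
    (hv : v = gRef nums multipliers p.1 p.2) :
    MemOK nums multipliers (memo.insert p v) := by
  have hc : memo.contains p = false := by
    rw [PySem.Dict.contains_eq_isSome_get?, hfresh]; rfl
  refine ⟨PySem.Dict.nodup_keys_insert _ _ _ hm.1, ?_, ?_⟩
  · intro k hk
    rw [PySem.Dict.keys_insert_of_not_contains _ _ hc, List.mem_append, List.mem_singleton] at hk
    rcases hk with hk | rfl
    · exact hm.2.1 k hk
    · exact hb
  · intro k w hw
    rw [PySem.Dict.get?_insert] at hw
    by_cases hkp : k = p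
    · rw [if_pos hkp] at hw
      rw [Option.some_inj] at hw
      rw [← hw, hkp]; exact hv
    · rw [if_neg hkp] at hw; exact hm.2.2 k w hw

theorem loop_ok (nums multipliers : List Int) :
    ∀ (fuel : Nat) (stack : List (Int × Int)) (memo : PySem.Dict (Int × Int) Int),
      StkOK (multipliers.length : Int) stack →
      MemOK nums multipliers memo →
      (∀ s ∈ stack, memo.get? s = none) →
      phi (multipliers.length : Int) stack memo ≤ fuel →
      (∀ k v, (altLoop nums multipliers (nums.length : Int) (multipliers.length : Int) fuel stack memo).get? k = some v →
          v = gRef nums multipliers k.1 k.2) ∧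
      (∀ s ∈ stack, ((altLoop nums multipliers (nums.length : Int) (multipliers.length : Int) fuel stack memo).get? s).isSome = true) ∧
      (∀ k, (memo.get? k).isSome = true →
          (altLoop nums multipliers (nums.length : Int) (multipliers.length : Int) fuel stack memo).get? k = memo.get? k) := by
  intro fuel
  induction fuel with
  | zero =>
    intro stack memo hstk hmem hfresh hphi
    cases stack with
    | nil => exact ⟨hmem.2.2, by simp, fun k _ => rfl⟩
    | cons top rest =>
      exfalso
      have hlen := stk_len_le _ _ hstk
      unfold phi at hphi
      generalize ((((multipliers.length : Int)+1)*((multipliers.length : Int)+1)).toNat - memo.size) * ((multipliers.length : Int).toNat + 3) = P at hphi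
      simp only [List.length_cons] at *
      omega
  | succ fuel ih =>
    intro stack memo hstk hmem hfresh hphi
    cases stack with
    | nil => exact ⟨hmem.2.2, by simp, fun k _ => rfl⟩
    | cons top rest =>
      obtain ⟨i, left⟩ := top
      have hfr0 : memo.get? (i, left) = none := hfresh _ (List.mem_cons_self)
      have hbtop := hstk.1 (i, left) (List.mem_cons_self)
      have hpw := stk_pairwise _ hstk.2
      have hrest_lt : ∀ s ∈ rest, s.1 < i := fun s hs => (List.pairwise_cons.mp hpw).1 s hs
      have hrest_ne : ∀ s ∈ rest, s ≠ (i, left) := by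
        intro s hs h
        have h2 := hrest_lt s hs
        rw [h] at h2
        exact lt_irrefl _ h2
      have hchain_rest : List.IsChain StkRel rest := hstk.2.tail
      have hstk_rest : StkOK (multipliers.length : Int) rest :=
        ⟨fun s hs => hstk.1 s (List.mem_cons_of_mem _ hs), hchain_rest⟩
      have hlen := stk_len_le _ _ hstk
      simp only [altLoop]
      rw [hfr0]
      simp only [Option.isSome_none, Bool.false_eq_true, if_false]
      by_cases him : i = (multipliers.length : Int)
      · rw [if_pos him]
        have hv0 : (0 : Int) = gRef nums multipliers i left := by
          rw [him]; exact (gRef_base nums multipliers left).symm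
        have hmem' : MemOK nums multipliers (memo.insert (i, left) 0) :=
          MemOK_insert _ _ _ _ _ hmem
            ⟨hbtop.1, hbtop.2.1, hbtop.2.2.1, le_trans hbtop.2.2.2 hbtop.2.1⟩ hfr0 hv0
        have hfresh' : ∀ s ∈ rest, (memo.insert (i, left) (0:Int)).get? s = none := by
          intro s hs
          rw [PySem.Dict.get?_insert, if_neg (hrest_ne s hs)]
          exact hfresh s (List.mem_cons_of_mem _ hs)
        have hsize : memo.size + 1 ≤ ((((multipliers.length : Int))+1)*(((multipliers.length : Int))+1)).toNat := by
          have h1 := memo_size_le nums multipliers _ hmem'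
          have h2 : memo.contains (i, left) = false := by
            rw [PySem.Dict.contains_eq_isSome_get?, hfr0]; rfl
          rw [PySem.Dict.size_insert, h2] at h1
          simpa using h1
        have hphi' := phi_insert_lt (multipliers.length : Int) (i, left) rest memo 0 hfr0 hsize hlen
        obtain ⟨C1, C2, C3⟩ := ih rest _ hstk_rest hmem' hfresh' (by omega)
        have hself : (memo.insert (i, left) (0:Int)).get? (i, left) = some 0 :=
          PySem.Dict.get?_insert_self _ _ _
        refine ⟨C1, ?_, ?_⟩
        · intro s hs
          rcases List.mem_cons.mp hs with rfl | hs'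
          · rw [C3 (i, left) (by rw [hself]; rfl), hself]; rfl
          · exact C2 s hs'
        · intro k hk
          have hkne : k ≠ (i, left) := by
            intro h; rw [h, hfr0] at hk; exact absurd hk (by simp)
          have heq : (memo.insert (i, left) (0:Int)).get? k = memo.get? k := by
            rw [PySem.Dict.get?_insert, if_neg hkne]
          rw [C3 k (by rw [heq]; exact hk), heq]
      · rw [if_neg him]
        have hilt : i < (multipliers.length : Int) := lt_of_le_of_ne hbtop.2.1 him
        by_cases hA : memo.get? (i+1, left+1) = none
        · rw [if_pos (by rw [hA]; rfl)]
          have hstk' : StkOK (multipliers.length : Int) ((i+1, left+1) :: (i, left) :: rest) := by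
            refine ⟨?_, List.isChain_cons_cons.mpr ⟨by show i < i + 1; omega, hstk.2⟩⟩
            intro s hs
            rcases List.mem_cons.mp hs with rfl | hs'
            · exact ⟨by omega, by omega, by omega, by omega⟩
            · exact hstk.1 s hs'
          have hfresh' : ∀ s ∈ (i+1, left+1) :: (i, left) :: rest, memo.get? s = none := by
            intro s hs
            rcases List.mem_cons.mp hs with rfl | hs'
            · exact hA
            · exact hfresh s hs'
          have hphi' := phi_push (multipliers.length : Int) ((i, left) :: rest) memo (i+1, left+1)
            (stk_len_le _ _ hstk')
          obtain ⟨C1, C2, C3⟩ := ih _ _ hstk' hmem hfresh' (by omega)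
          exact ⟨C1, fun s hs => C2 s (List.mem_cons_of_mem _ hs), C3⟩
        · rw [if_neg (by rw [Option.isNone_iff_eq_none]; exact hA)]
          by_cases hB : memo.get? (i+1, left) = none
          · rw [if_pos (by rw [hB]; rfl)]
            have hstk' : StkOK (multipliers.length : Int) ((i+1, left) :: (i, left) :: rest) := by
              refine ⟨?_, List.isChain_cons_cons.mpr ⟨by show i < i + 1; omega, hstk.2⟩⟩
              intro s hs
              rcases List.mem_cons.mp hs with rfl | hs'
              · exact ⟨by omega, by omega, by omega, by omega⟩
              · exact hstk.1 s hs'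
            have hfresh' : ∀ s ∈ (i+1, left) :: (i, left) :: rest, memo.get? s = none := by
              intro s hs
              rcases List.mem_cons.mp hs with rfl | hs'
              · exact hB
              · exact hfresh s hs'
            have hphi' := phi_push (multipliers.length : Int) ((i, left) :: rest) memo (i+1, left)
              (stk_len_le _ _ hstk')
            obtain ⟨C1, C2, C3⟩ := ih _ _ hstk' hmem hfresh' (by omega)
            exact ⟨C1, fun s hs => C2 s (List.mem_cons_of_mem _ hs), C3⟩
          · rw [if_neg (by rw [Option.isNone_iff_eq_none]; exact hB)]
            obtain ⟨va, hva⟩ : ∃ w, memo.get? (i+1, left+1) = some w :=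
              Option.ne_none_iff_exists'.mp hA
            obtain ⟨vb, hvb⟩ : ∃ w, memo.get? (i+1, left) = some w :=
              Option.ne_none_iff_exists'.mp hB
            have hva' : va = gRef nums multipliers (i+1) (left+1) := hmem.2.2 (i+1, left+1) va hva
            have hvb' : vb = gRef nums multipliers (i+1) left := hmem.2.2 (i+1, left) vb hvb
            have hveq : max ((PySem.List.pyGet? multipliers i).getD 0 * (PySem.List.pyGet? nums left).getD 0 + memo.getD (i+1, left+1) 0)
                ((PySem.List.pyGet? multipliers i).getD 0 * (PySem.List.pyGet? nums ((nums.length : Int) - 1 - (i - left))).getD 0 + memo.getD (i+1, left) 0)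
                = gRef nums multipliers i left := by
              rw [PySem.Dict.getD_eq_get?_getD, PySem.Dict.getD_eq_get?_getD, hva, hvb]
              simp only [Option.getD_some]
              rw [hva', hvb']
              conv_rhs => rw [gRef]
              rw [dif_pos hilt]
            rw [hveq]
            have hmem' : MemOK nums multipliers (memo.insert (i, left) (gRef nums multipliers i left)) :=
              MemOK_insert _ _ _ _ _ hmem
                ⟨hbtop.1, hbtop.2.1, hbtop.2.2.1, le_trans hbtop.2.2.2 hbtop.2.1⟩ hfr0 rfl
            have hfresh' : ∀ s ∈ rest, (memo.insert (i, left) (gRef nums multipliers i left)).get? s = none := by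
              intro s hs
              rw [PySem.Dict.get?_insert, if_neg (hrest_ne s hs)]
              exact hfresh s (List.mem_cons_of_mem _ hs)
            have hsize : memo.size + 1 ≤ ((((multipliers.length : Int))+1)*(((multipliers.length : Int))+1)).toNat := by
              have h1 := memo_size_le nums multipliers _ hmem'
              have h2 : memo.contains (i, left) = false := by
                rw [PySem.Dict.contains_eq_isSome_get?, hfr0]; rfl
              rw [PySem.Dict.size_insert, h2] at h1
              simpa using h1
            have hphi' := phi_insert_lt (multipliers.length : Int) (i, left) rest memo
              (gRef nums multipliers i left) hfr0 hsize hlen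
            obtain ⟨C1, C2, C3⟩ := ih rest _ hstk_rest hmem' hfresh' (by omega)
            have hself : (memo.insert (i, left) (gRef nums multipliers i left)).get? (i, left)
                = some (gRef nums multipliers i left) := PySem.Dict.get?_insert_self _ _ _
            refine ⟨C1, ?_, ?_⟩
            · intro s hs
              rcases List.mem_cons.mp hs with rfl | hs'
              · rw [C3 (i, left) (by rw [hself]; rfl), hself]; rfl
              · exact C2 s hs'
            · intro k hk
              have hkne : k ≠ (i, left) := by
                intro h; rw [h, hfr0] at hk; exact absurd hk (by simp)
              have heq : (memo.insert (i, left) (gRef nums multipliers i left)).get? k = memo.get? k := by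
                rw [PySem.Dict.get?_insert, if_neg hkne]
              rw [C3 k (by rw [heq]; exact hk), heq]


theorem alt_eq_gRef (nums multipliers : List Int) :
    maximumScore_alt nums multipliers = gRef nums multipliers 0 0 := by
  have hstk : StkOK (multipliers.length : Int) [((0:Int), (0:Int))] :=
    ⟨by intro s hs; rcases List.mem_singleton.mp hs with rfl; exact ⟨le_rfl, by positivity, le_rfl, le_rfl⟩,
     List.isChain_singleton _⟩
  have hmem : MemOK nums multipliers (PySem.Dict.empty) := by
    refine ⟨by rw [PySem.Dict.keys_empty]; exact List.nodup_nil, ?_, ?_⟩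
    · intro k hk; rw [PySem.Dict.keys_empty] at hk; exact absurd hk (List.not_mem_nil)
    · intro k v hv; rw [PySem.Dict.get?_empty] at hv; exact absurd hv (by simp)
  have hfresh : ∀ s ∈ [((0:Int), (0:Int))], (PySem.Dict.empty : PySem.Dict (Int × Int) Int).get? s = none :=
    fun s _ => PySem.Dict.get?_empty s
  have hphi : phi (multipliers.length : Int) [((0:Int), (0:Int))] PySem.Dict.empty
      ≤ altFuel (multipliers.length : Int) := by
    unfold phi altFuel
    rw [PySem.Dict.size_empty]
    have h0 : (0:Int) ≤ ((multipliers.length : Int) + 1) * ((multipliers.length : Int) + 1) :=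
      mul_nonneg (by omega) (by omega)
    rw [Int.toNat_mul (by omega) (by omega : (0:Int) ≤ (multipliers.length : Int) + 3)]
    have h1 : (((multipliers.length : Int) + 1) * ((multipliers.length : Int) + 1) + 1).toNat
        = (((multipliers.length : Int) + 1) * ((multipliers.length : Int) + 1)).toNat + 1 := by omega
    rw [h1, Nat.succ_mul]
    have h2 : ((multipliers.length : Int) + 3).toNat = (multipliers.length : Int).toNat + 3 := by omega
    rw [h2]
    generalize (((multipliers.length : Int) + 1) * ((multipliers.length : Int) + 1)).toNat * ((multipliers.length : Int).toNat + 3) = P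
    simp only [List.length_cons, List.length_nil]
    omega
  obtain ⟨C1, C2, C3⟩ := loop_ok nums multipliers (altFuel (multipliers.length : Int))
    [((0:Int), (0:Int))] PySem.Dict.empty hstk hmem hfresh hphi
  have h2 := C2 (0, 0) (List.mem_singleton.mpr rfl)
  obtain ⟨v, hv⟩ := Option.isSome_iff_exists.mp h2
  have hval : v = gRef nums multipliers 0 0 := C1 (0, 0) v hv
  show ((altLoop nums multipliers (nums.length : Int) (multipliers.length : Int)
      (altFuel (multipliers.length : Int)) [(0, 0)] PySem.Dict.empty).get? (0, 0)).getD 0 = _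
  rw [hv, Option.getD_some, hval]

theorem maximumScore_spec : Claim_equal_maximumScore := by
  unfold Claim_equal_maximumScore
  intro nums multipliers _ _
  unfold Spec_maximumScore
  rw [A_eq_gRef, alt_eq_gRef]
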